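-- pv_equiv track=rewrite | github.com/mcadoo300/Project_Euler_Solutions | sol_51_v2.py | num_repeating_digits
-- ===== SOURCE A (Python) =====
-- def num_repeating_digits(num1):
--     str_num1 = str(num1)
--     repeating_count = 0
--     for digit in str_num1:
--         if str_num1.count(digit) > 1:
--             repeating_count += str_num1.count(digit)
--             str_num1 = str_num1.replace(digit, "")
--     return repeating_count
-- ===== SOURCE B (Python) =====
-- def num_repeating_digits(num1):
--     counts = {}
--     for ch in str(num1):
--         counts[ch] = counts.get(ch, 0) + 1
--     return sum(c for c in counts.values() if c > 1)
-- ===== Notes on version B (the rewrite author's own statement) =====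
-- stated objective: simpler
-- what changed: B builds a frequency dict of str(num1) in one pass and sums, over the distinct characters, the counts of those occurring more than once, replacing A's repeated str.count scans and in-place replace trick.
import Mathlib
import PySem

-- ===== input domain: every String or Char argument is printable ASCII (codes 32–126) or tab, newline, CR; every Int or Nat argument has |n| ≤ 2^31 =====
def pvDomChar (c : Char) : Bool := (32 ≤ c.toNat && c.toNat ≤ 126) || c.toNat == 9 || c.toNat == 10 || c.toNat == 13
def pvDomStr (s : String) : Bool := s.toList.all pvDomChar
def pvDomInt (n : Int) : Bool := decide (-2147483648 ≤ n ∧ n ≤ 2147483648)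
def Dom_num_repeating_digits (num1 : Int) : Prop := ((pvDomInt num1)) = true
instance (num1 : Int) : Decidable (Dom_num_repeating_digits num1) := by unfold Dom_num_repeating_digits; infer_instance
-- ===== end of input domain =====

-- B replaces A's repeated str.count scans and in-place replace trick by one frequency
-- dict built in a single pass, then sums the counts of distinct characters occurring more than once (simpler).

-- ===== PORT A =====
def num_repeating_digits (num1 : Int) : Int :=
  let s0 := PySem.Int.toChars num1
  (s0.foldl (fun (st : List Char × Int) digit =>
      if PySem.Chars.count st.1 [digit] > 1 then
        (PySem.Chars.replace st.1 [digit] [], st.2 + (PySem.Chars.count st.1 [digit] : Int))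
      else st) (s0, 0)).2

-- ===== PORT B =====
def num_repeating_digits_alt (num1 : Int) : Int :=
  ((PySem.Dict.values ((PySem.Int.toChars num1).foldl
      (fun (d : PySem.Dict Char Int) ch => d.insert ch (d.getD ch 0 + 1)) PySem.Dict.empty)).filter
    (fun c => c > 1)).sum

-- ===== PRECONDITION & SPEC =====
def Spec_num_repeating_digits (num1 : Int) (out : Int) : Prop := out = num_repeating_digits_alt num1
instance (num1 : Int) (out : Int) : Decidable (Spec_num_repeating_digits num1 out) := by unfold Spec_num_repeating_digits; infer_instance

-- ===== CLAIM (what is proved, stated in full; the proofs are below) =====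
def Claim_equal_num_repeating_digits : Prop := ∀ (num1 : Int), Dom_num_repeating_digits num1 → Spec_num_repeating_digits num1 (num_repeating_digits num1)

-- ===== LEMMAS AND PROOFS =====

-- Chars.count with a single-character needle is List.count
theorem pv_count_go_single (d : Char) (t : List Char) (fuel acc : Nat) (h : t.length ≤ fuel) :
    PySem.Chars.count.go [d] fuel t acc = acc + t.count d := by
  induction t generalizing fuel acc with
  | nil => cases fuel <;> simp [PySem.Chars.count.go]
  | cons c t ih =>
    cases fuel with
    | zero => simp at h
    | succ f =>
      simp only [PySem.Chars.count.go]
      by_cases hdc : d = c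
      · subst hdc
        simp [List.isPrefixOf, ih _ _ (by simpa using h)]
        omega
      · simp [List.isPrefixOf, hdc, ih _ _ (by simpa using h), Ne.symm hdc]

theorem pv_count_single (t : List Char) (d : Char) :
    PySem.Chars.count t [d] = t.count d := by
  simp [PySem.Chars.count, pv_count_go_single d t t.length 0 le_rfl]

-- Chars.replace deleting a single character is List.filter
theorem pv_replace_go_single (d : Char) (t : List Char) (fuel : Nat) (acc : List Char)
    (h : t.length ≤ fuel) :
    PySem.Chars.replace.go [d] [] fuel t acc = acc.reverse ++ t.filter (fun a => !(a == d)) := by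
  induction t generalizing fuel acc with
  | nil => cases fuel <;> simp [PySem.Chars.replace.go]
  | cons c t ih =>
    cases fuel with
    | zero => simp at h
    | succ f =>
      simp only [PySem.Chars.replace.go]
      by_cases hdc : d = c
      · subst hdc
        simp [List.isPrefixOf, ih _ _ (by simpa using h)]
      · simp [List.isPrefixOf, hdc, ih _ _ (by simpa using h), Ne.symm hdc]

theorem pv_replace_single (t : List Char) (d : Char) :
    PySem.Chars.replace t [d] [] = t.filter (fun a => !(a == d)) := by
  simp [PySem.Chars.replace, pv_replace_go_single d t t.length [] le_rfl]

-- A's loop body, in List.count / List.filter form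
def pvStepA (st : List Char × Int) (d : Char) : List Char × Int :=
  if st.1.count d > 1 then (st.1.filter (fun a => !(a == d)), st.2 + (st.1.count d : Int)) else st

theorem pv_stepA_eq :
    (fun (st : List Char × Int) digit =>
      if PySem.Chars.count st.1 [digit] > 1 then
        (PySem.Chars.replace st.1 [digit] [], st.2 + (PySem.Chars.count st.1 [digit] : Int))
      else st) = pvStepA := by
  funext st d
  simp [pvStepA, pv_count_single, pv_replace_single]

theorem pv_filter_count_ne (t : List Char) (x c : Char) (h : c ≠ x) :
    (t.filter (fun a => !(a == x))).count c = t.count c := by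
  simp [List.count_filter, h]

theorem pv_filter_count_self (t : List Char) (x : Char) :
    (t.filter (fun a => !(a == x))).count x = 0 := by
  simp [List.count_eq_zero, List.mem_filter]

-- Invariant proof for A's loop: the result is the sum, over the distinct characters of the
-- remaining iteration list, of the count when it exceeds 1.
theorem pv_loopA (l : List Char) : ∀ (t : List Char) (acc : Int),
    (∀ c ∈ l, t.count c = 0 ∨ t.count c = l.count c) →
    (l.foldl pvStepA (t, acc)).2
      = acc + ∑ c ∈ l.toFinset, (if t.count c > 1 then (l.count c : Int) else 0) := by
  induction l with
  | nil => intro t acc _; simp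
  | cons x l ih =>
    intro t acc h
    have hins : ((x :: l).toFinset : Finset Char) = insert x l.toFinset := by
      simp
    have hsum : ∀ (g : Char → Int),
        (insert x l.toFinset).sum g = g x + (l.toFinset.erase x).sum g := by
      intro g
      have hie : insert x (l.toFinset.erase x) = insert x l.toFinset := by
        ext c; simp [Finset.mem_erase, Finset.mem_insert]; tauto
      rw [← hie]
      exact Finset.sum_insert (Finset.notMem_erase x l.toFinset)
    simp only [List.foldl_cons, hins, hsum]
    by_cases hx : t.count x > 1
    · have hcx : t.count x = (x :: l).count x := by
        rcases h x List.mem_cons_self with h0 | h1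
        · omega
        · exact h1
      have hstep : pvStepA (t, acc) x
          = (t.filter (fun a => !(a == x)), acc + (t.count x : Int)) := by
        simp [pvStepA, hx]
      rw [hstep, ih _ _ ?_]
      · have hzero : (if (t.filter (fun a => !(a == x))).count x > 1
            then ((l.count x : Nat) : Int) else 0) = 0 := by
          simp [pv_filter_count_self]
        rw [← Finset.sum_erase (s := l.toFinset)
            (f := fun c => if (t.filter (fun a => !(a == x))).count c > 1
              then ((l.count c : Nat) : Int) else 0) (h := hzero)]
        have hcong : (l.toFinset.erase x).sum
              (fun c => if (t.filter (fun a => !(a == x))).count c > 1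
                then ((l.count c : Nat) : Int) else 0)
            = (l.toFinset.erase x).sum
              (fun c => if t.count c > 1 then (((x :: l).count c : Nat) : Int) else 0) := by
          apply Finset.sum_congr rfl
          intro c hc
          have hcne : c ≠ x := (Finset.mem_erase.mp hc).1
          rw [pv_filter_count_ne t x c hcne]
          simp [Ne.symm hcne]
        rw [hcong]
        have hgx : (if t.count x > 1 then (((x :: l).count x : Nat) : Int) else 0)
            = (t.count x : Int) := by
          simp [hx, ← hcx]
        rw [hgx]
        ring
      · intro c hc
        by_cases hcx' : c = x
        · subst hcx'; left; exact pv_filter_count_self t c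
        · rw [pv_filter_count_ne t x c hcx']
          rcases h c (List.mem_cons_of_mem x hc) with h0 | h1
          · left; exact h0
          · right; rw [h1]; simp [Ne.symm hcx']
    · have hstep : pvStepA (t, acc) x = (t, acc) := by
        simp [pvStepA]; omega
      rw [hstep, ih _ _ ?_]
      · have hgx : (if t.count x > 1 then (((x :: l).count x : Nat) : Int) else 0) = 0 := by
          simp [hx]
        rw [hgx]
        have hzero : (if t.count x > 1 then ((l.count x : Nat) : Int) else 0) = 0 := by
          simp [hx]
        rw [← Finset.sum_erase (s := l.toFinset)
            (f := fun c => if t.count c > 1 then ((l.count c : Nat) : Int) else 0) (h := hzero)]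
        have hcong : (l.toFinset.erase x).sum
              (fun c => if t.count c > 1 then ((l.count c : Nat) : Int) else 0)
            = (l.toFinset.erase x).sum
              (fun c => if t.count c > 1 then (((x :: l).count c : Nat) : Int) else 0) := by
          apply Finset.sum_congr rfl
          intro c hc
          have hcne : c ≠ x := (Finset.mem_erase.mp hc).1
          simp [Ne.symm hcne]
        rw [hcong]
        ring
      · intro c hc
        rcases h c (List.mem_cons_of_mem x hc) with h0 | h1
        · left; exact h0
        · by_cases hcx' : c = x
          · subst hcx'
            have h2 : l.count c ≥ 1 := List.one_le_count_iff.mpr hc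
            rw [h1] at hx
            rw [List.count_cons_self] at hx
            omega
          · right; rw [h1]; simp [Ne.symm hcx']

-- B-side: filtered sum of mapped values as a mapped if-sum
theorem pv_sum_filter_gt (L : List Char) (f : Char → Int) :
    ((L.map f).filter (fun c => c > 1)).sum
      = (L.map (fun k => if f k > 1 then f k else 0)).sum := by
  induction L with
  | nil => simp
  | cons x L ih =>
    by_cases hx : f x > 1 <;> simp [hx, ih]

theorem pv_toFinset_ofList (s : List Char) : (PySem.Set.ofList s).toFinset = s.toFinset := by
  apply Finset.ext
  intro c
  simp [List.mem_toFinset, PySem.Set.mem_ofList]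

-- ===== VERDICT (by name: the statement is the Claim_ definition above) =====
theorem num_repeating_digits_spec : Claim_equal_num_repeating_digits := by
  unfold Claim_equal_num_repeating_digits
  intro n _
  unfold Spec_num_repeating_digits num_repeating_digits num_repeating_digits_alt
  rw [pv_stepA_eq]
  set s := PySem.Int.toChars n with hs
  rw [pv_loopA s s 0 (fun c _ => Or.inr rfl)]
  rw [PySem.Dict.foldl_insert_getD_add_one_eq_counter]
  have hvals : PySem.Dict.values (PySem.Dict.counter s)
      = (PySem.Set.ofList s).map (fun k => ((s.count k : Nat) : Int)) := by
    simp [PySem.Dict.values, PySem.Dict.items_counter, List.map_map, Function.comp]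
  rw [hvals, pv_sum_filter_gt]
  have hmapeq : (PySem.Set.ofList s).map
        (fun k => if ((s.count k : Nat) : Int) > 1 then ((s.count k : Nat) : Int) else 0)
      = (PySem.Set.ofList s).map
        (fun k => if s.count k > 1 then ((s.count k : Nat) : Int) else 0) := by
    apply List.map_congr_left
    intro c _
    by_cases hc : s.count c > 1
    · simp [hc, Nat.one_lt_cast.mpr hc]
    · have : ¬ (((s.count c : Nat) : Int) > 1) := by exact_mod_cast hc
      simp [hc, this]
  rw [hmapeq,
    ← List.sum_toFinset (fun c => if s.count c > 1 then ((s.count c : Nat) : Int) else 0)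
      (PySem.Set.nodup_ofList s),
    pv_toFinset_ofList]
  ring
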